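-- pv_equiv track=rewrite | github.com/twotwo/refactoring-python | ch7/709_substitute_algorithm.py | found_person_before
-- ===== SOURCE A (Python) =====
-- def found_person_before(people):
--     for i in range(len(people)):
--         if people[i] == "Don":
--             return "Don"
--         if people[i] == "John":
--             return "John"
--         if people[i] == "Kent":
--             return "Kent"
--     return ""
-- ===== SOURCE B (Python) =====
-- def found_person_before(people):
--     best_name = ""
--     best_i = len(people)
--     for name in ("Don", "John", "Kent"):
--         if name in people:
--             i = people.index(name)
--             if i < best_i:
--                 best_name, best_i = name, i
--     return best_name
-- ===== Notes on version B (the rewrite author's own statement) =====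
-- stated objective: alternative
-- what changed: Instead of scanning people left-to-right and returning on the first element equal to one of the three names, B iterates over the three target names, looks up each name's first index with list.index, and returns the name with the smallest index (or '' if none occurs).
import Mathlib
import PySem

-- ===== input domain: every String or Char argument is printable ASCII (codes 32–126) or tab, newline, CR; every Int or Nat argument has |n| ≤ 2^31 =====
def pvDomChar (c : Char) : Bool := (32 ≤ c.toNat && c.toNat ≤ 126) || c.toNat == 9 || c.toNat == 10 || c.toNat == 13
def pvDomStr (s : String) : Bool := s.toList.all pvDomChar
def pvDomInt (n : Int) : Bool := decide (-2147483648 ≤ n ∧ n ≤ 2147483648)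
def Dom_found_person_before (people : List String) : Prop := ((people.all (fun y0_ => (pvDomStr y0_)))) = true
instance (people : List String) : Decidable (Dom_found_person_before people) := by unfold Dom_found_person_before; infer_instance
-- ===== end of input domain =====

-- B replaces A's single left-to-right scan of people by per-name first-index lookups
-- over the three target names, selecting the name with the minimal index (alternative decomposition).


-- ===== PORT A =====
-- the index loop 'for i in range(len(people))' visits the elements left to right; early return
def found_person_before (people : List String) : String :=
  match people with
  | [] => ""
  | p :: rest =>
    if p == "Don" then "Don"
    else if p == "John" then "John"
    else if p == "Kent" then "Kent"
    else found_person_before rest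

-- ===== PORT B =====
-- 'if name in people: i = people.index(name)' → match on PySem.List.index? (none = not in people)
def found_person_before_alt (people : List String) : String :=
  (["Don", "John", "Kent"].foldl
    (fun (acc : String × Nat) (name : String) =>
      match PySem.List.index? people name with
      | some i => if i < acc.2 then (name, i) else acc
      | none => acc)
    ("", people.length)).1

-- ===== PRECONDITION & SPEC =====
def Spec_found_person_before (people : List String) (out : String) : Prop := out = found_person_before_alt people
instance (people : List String) (out : String) : Decidable (Spec_found_person_before people out) := by unfold Spec_found_person_before; infer_instance

-- ===== CLAIM (what is proved, stated in full; the proofs are below) =====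
def Claim_equal_found_person_before : Prop := ∀ (people : List String), Dom_found_person_before people → Spec_found_person_before people (found_person_before people)

-- ===== LEMMAS AND PROOFS =====

theorem alt_nil : found_person_before_alt [] = "" := by decide

theorem alt_cons (p : String) (xs : List String) :
    found_person_before_alt (p :: xs) =
      if p == "Don" then "Don"
      else if p == "John" then "John"
      else if p == "Kent" then "Kent"
      else found_person_before_alt xs := by
  by_cases hD : p = "Don"
  · subst hD
    have eS := PySem.List.index?_cons_self "Don" xs
    have eJ := PySem.List.index?_cons_of_ne (x := "Don") (v := "John") xs (by decide)
    have eK := PySem.List.index?_cons_of_ne (x := "Don") (v := "Kent") xs (by decide)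
    simp only [PySem.List.index?_eq_idxOf?] at eS eJ eK
    rcases hJ : List.idxOf? "John" xs with _ | j <;>
    rcases hK : List.idxOf? "Kent" xs with _ | k <;>
      simp [found_person_before_alt, eS, eJ, eK, hJ, hK]
  · by_cases hJ : p = "John"
    · subst hJ
      have eS := PySem.List.index?_cons_self "John" xs
      have eD := PySem.List.index?_cons_of_ne (x := "John") (v := "Don") xs (by decide)
      have eK := PySem.List.index?_cons_of_ne (x := "John") (v := "Kent") xs (by decide)
      simp only [PySem.List.index?_eq_idxOf?] at eS eD eK
      rcases hD' : List.idxOf? "Don" xs with _ | d <;>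
      rcases hK : List.idxOf? "Kent" xs with _ | k <;>
        simp [found_person_before_alt, eS, eD, eK, hD', hK] <;>
        (try split_ifs) <;> simp_all
    · by_cases hK : p = "Kent"
      · subst hK
        have eS := PySem.List.index?_cons_self "Kent" xs
        have eD := PySem.List.index?_cons_of_ne (x := "Kent") (v := "Don") xs (by decide)
        have eJ := PySem.List.index?_cons_of_ne (x := "Kent") (v := "John") xs (by decide)
        simp only [PySem.List.index?_eq_idxOf?] at eS eD eJ
        rcases hD' : List.idxOf? "Don" xs with _ | d <;>
        rcases hJ' : List.idxOf? "John" xs with _ | j <;>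
          simp [found_person_before_alt, eS, eD, eJ, hD', hJ'] <;>
          (try split_ifs) <;> simp_all
      · -- p matches no target: every index shifts by one, and n+1 replaces n; result unchanged
        have eD := PySem.List.index?_cons_of_ne (x := p) (v := "Don") xs hD
        have eJ := PySem.List.index?_cons_of_ne (x := p) (v := "John") xs hJ
        have eK := PySem.List.index?_cons_of_ne (x := p) (v := "Kent") xs hK
        simp only [PySem.List.index?_eq_idxOf?] at eD eJ eK
        rcases hD' : List.idxOf? "Don" xs with _ | d <;>
        rcases hJ' : List.idxOf? "John" xs with _ | j <;>
        rcases hK' : List.idxOf? "Kent" xs with _ | k <;>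
          simp [found_person_before_alt, eD, eJ, eK, hD, hJ, hK, hD', hJ', hK'] <;>
          (try split_ifs) <;> simp_all

-- ===== VERDICT (by name: the statement is the Claim_ definition above) =====
theorem found_person_before_spec : Claim_equal_found_person_before := by
  intro people hdom
  unfold Spec_found_person_before
  induction people with
  | nil => simp [found_person_before, alt_nil]
  | cons p xs ih =>
    have hxs : Dom_found_person_before xs := by
      unfold Dom_found_person_before at hdom ⊢
      simp_all
    rw [alt_cons]
    simp only [found_person_before]
    split_ifs <;> simp_all
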